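-- pv_equiv track=rewrite | github.com/arkB/kasane | src/kasane/chunker.py | _create_qa_pairs
-- ===== SOURCE A (Python) =====
-- def _create_qa_pairs(messages: list[dict[str, str]]) -> list[dict[str, str]]:
--     pairs = []
--     i = 0
--     while i < len(messages):
--         msg = messages[i]
--         role = msg["role"].lower()
--         if role in ("human", "user"):
--             human_text = msg["content"]
--             assistant_text = ""
--             j = i + 1
--             while j < len(messages):
--                 next_role = messages[j]["role"].lower()
--                 if next_role in ("human", "user"):
--                     break
--                 if next_role in ("assistant", "ai"):
--                     assistant_text = messages[j]["content"]
--                     j += 1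
--                     break
--                 j += 1
--             pairs.append({"human": human_text, "assistant": assistant_text})
--             i = j
--         else:
--             i += 1
--     return pairs
-- ===== SOURCE B (Python) =====
-- def _create_qa_pairs(messages: list[dict[str, str]]) -> list[dict[str, str]]:
--     pairs = []
--     pending = None
--     for msg in messages:
--         role = msg["role"].lower()
--         if role in ("human", "user"):
--             if pending is not None:
--                 pairs.append({"human": pending, "assistant": ""})
--             pending = msg["content"]
--         elif role in ("assistant", "ai"):
--             if pending is not None:
--                 pairs.append({"human": pending, "assistant": msg["content"]})
--                 pending = None
--     if pending is not None:
--         pairs.append({"human": pending, "assistant": ""})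
--     return pairs
-- ===== Notes on version B (the rewrite author's own statement) =====
-- stated objective: simpler
-- what changed: Replaced A's nested while loops (an inner rescan after every human message with index handoff i = j) by a single flat for loop over the messages maintaining a pending-human variable, flushed once after the loop.
import Mathlib
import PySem

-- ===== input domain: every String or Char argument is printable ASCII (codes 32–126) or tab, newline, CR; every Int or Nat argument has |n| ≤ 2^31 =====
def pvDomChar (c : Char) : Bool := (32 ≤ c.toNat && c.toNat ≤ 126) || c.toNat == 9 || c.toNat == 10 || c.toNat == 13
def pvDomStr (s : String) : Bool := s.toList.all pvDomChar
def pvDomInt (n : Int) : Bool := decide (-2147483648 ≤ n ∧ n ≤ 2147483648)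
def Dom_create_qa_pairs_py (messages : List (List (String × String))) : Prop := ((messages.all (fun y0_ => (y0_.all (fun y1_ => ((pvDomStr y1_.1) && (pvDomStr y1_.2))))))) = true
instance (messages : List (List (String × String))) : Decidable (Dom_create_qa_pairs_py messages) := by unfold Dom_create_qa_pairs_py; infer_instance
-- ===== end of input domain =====

-- B replaces A's nested rescanning loops by one flat pass with a pending-human variable (simpler decomposition).


-- ===== PORT A =====
-- msg["role"].lower() / msg["content"]; lookup is first-match on the association list (getD is safe: Pre_ guarantees the key is present wherever Python reads it)
def pvRole (m : List (String × String)) : String :=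
  PySem.Str.lower ((PySem.Dict.mk m).getD "role" "")

def pvContent (m : List (String × String)) : String :=
  (PySem.Dict.mk m).getD "content" ""

-- A's inner while loop over the suffix after a human message: returns (assistant_text, suffix at which the outer loop resumes, i.e. index j)
def pvInner (rest : List (List (String × String))) : String × List (List (String × String)) :=
  match rest with
  | [] => ("", [])
  | m :: rs =>
    if pvRole m = "human" ∨ pvRole m = "user" then ("", m :: rs)
    else if pvRole m = "assistant" ∨ pvRole m = "ai" then (pvContent m, rs)
    else pvInner rs

theorem pvInner_len (rest : List (List (String × String))) : (pvInner rest).2.length ≤ rest.length := by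
  induction rest with
  | nil => simp [pvInner]
  | cons m rs ih =>
    simp only [pvInner]
    split_ifs <;> simp
    omega

-- A's outer while loop: i ↦ the suffix messages[i:]
def create_qa_pairs_py (messages : List (List (String × String))) : List (List (String × String)) :=
  match messages with
  | [] => []
  | m :: rest =>
    if pvRole m = "human" ∨ pvRole m = "user" then
      [("human", pvContent m), ("assistant", (pvInner rest).1)] :: create_qa_pairs_py (pvInner rest).2
    else
      create_qa_pairs_py rest
termination_by messages.length
decreasing_by
  · have := pvInner_len rest; simp; omega
  · simp

-- ===== PORT B =====
-- one step of B's for loop: state = (pairs so far, pending human content)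
def pvStep (st : List (List (String × String)) × Option String) (m : List (String × String)) :
    List (List (String × String)) × Option String :=
  if pvRole m = "human" ∨ pvRole m = "user" then
    (match st.2 with
     | some h => st.1 ++ [[("human", h), ("assistant", "")]]
     | none => st.1,
     some (pvContent m))
  else if pvRole m = "assistant" ∨ pvRole m = "ai" then
    match st.2 with
    | some h => (st.1 ++ [[("human", h), ("assistant", pvContent m)]], none)
    | none => st
  else st

-- the final flush after the loop
def pvFlush (st : List (List (String × String)) × Option String) : List (List (String × String)) :=
  match st.2 with
  | some h => st.1 ++ [[("human", h), ("assistant", "")]]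
  | none => st.1

def create_qa_pairs_py_alt (messages : List (List (String × String))) : List (List (String × String)) :=
  pvFlush (messages.foldl pvStep ([], none))

-- ===== PRECONDITION & SPEC =====
-- Pre_ excludes exactly the inputs on which Python A raises KeyError: a message without "role", a
-- human/user message without "content", or an assistant/ai message without "content" that directly
-- answers a human/user message (only roles outside the four classes between them), so A reads it.
def Pre_create_qa_pairs_py (messages : List (List (String × String))) : Prop :=
  (∀ m ∈ messages, ((PySem.Dict.mk m).contains "role") = true) ∧
  (∀ m ∈ messages, (pvRole m = "human" ∨ pvRole m = "user") →
      ((PySem.Dict.mk m).contains "content") = true) ∧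
  (∀ j : Fin messages.length, ∀ i : Fin messages.length, i < j →
      (pvRole messages[j] = "assistant" ∨ pvRole messages[j] = "ai") →
      (pvRole messages[i] = "human" ∨ pvRole messages[i] = "user") →
      (∀ k : Fin messages.length, i < k → k < j →
        ¬(pvRole messages[k] = "human" ∨ pvRole messages[k] = "user" ∨
          pvRole messages[k] = "assistant" ∨ pvRole messages[k] = "ai")) →
      ((PySem.Dict.mk messages[j]).contains "content") = true)
instance (messages : List (List (String × String))) : Decidable (Pre_create_qa_pairs_py messages) := by unfold Pre_create_qa_pairs_py; infer_instance

def pvWitness_create_qa_pairs_py : (List (List (String × String))) :=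
  [[("role", "user"), ("content", "hi")], [("role", "system"), ("content", "x")], [("role", "Assistant"), ("content", "hello")]]

def Spec_create_qa_pairs_py (messages : List (List (String × String))) (out : List (List (String × String))) : Prop := out = create_qa_pairs_py_alt messages
instance (messages : List (List (String × String))) (out : List (List (String × String))) : Decidable (Spec_create_qa_pairs_py messages out) := by unfold Spec_create_qa_pairs_py; infer_instance

-- ===== CLAIM (what is proved, stated in full; the proofs are below) =====
def Claim_equal_create_qa_pairs_py : Prop := ∀ (messages : List (List (String × String))), Dom_create_qa_pairs_py messages → Pre_create_qa_pairs_py messages → Spec_create_qa_pairs_py messages (create_qa_pairs_py messages)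

-- ===== LEMMAS AND PROOFS =====

-- Invariant of B's loop, stated for both values of the pending variable and proved by one induction:
-- with no pending human the loop produces exactly A's output for the remaining suffix; with pending
-- human h it produces the pair A would build from h and the inner scan, then A's output on the rest.
theorem pvLoop_inv (msgs : List (List (String × String))) :
    (∀ acc, pvFlush (msgs.foldl pvStep (acc, none)) = acc ++ create_qa_pairs_py msgs) ∧
    (∀ acc h, pvFlush (msgs.foldl pvStep (acc, some h)) =
      acc ++ ([("human", h), ("assistant", (pvInner msgs).1)] :: create_qa_pairs_py (pvInner msgs).2)) := by
  induction msgs with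
  | nil =>
    constructor
    · intro acc; simp [pvFlush, create_qa_pairs_py]
    · intro acc h; simp [pvFlush, pvInner, create_qa_pairs_py]
  | cons m rest ih =>
    obtain ⟨ih1, ih2⟩ := ih
    by_cases hh : pvRole m = "human" ∨ pvRole m = "user"
    · constructor
      · intro acc
        simp only [List.foldl_cons, pvStep, if_pos hh, ih2, create_qa_pairs_py]
      · intro acc h
        simp only [List.foldl_cons, pvStep, if_pos hh, ih2, pvInner, create_qa_pairs_py]
        simp [List.append_assoc]
    · by_cases ha : pvRole m = "assistant" ∨ pvRole m = "ai"
      · constructor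
        · intro acc
          simp only [List.foldl_cons, pvStep, if_neg hh, if_pos ha, ih1, create_qa_pairs_py]
        · intro acc h
          simp only [List.foldl_cons, pvStep, if_neg hh, if_pos ha, ih1, pvInner]
          simp [List.append_assoc]
      · constructor
        · intro acc
          simp only [List.foldl_cons, pvStep, if_neg hh, if_neg ha, ih1, create_qa_pairs_py]
        · intro acc h
          simp only [List.foldl_cons, pvStep, if_neg hh, if_neg ha, ih2, pvInner]

-- ===== VERDICT (by name: the statement is the Claim_ definition above) =====
theorem create_qa_pairs_py_spec : Claim_equal_create_qa_pairs_py := by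
  intro messages _ _
  unfold Spec_create_qa_pairs_py create_qa_pairs_py_alt
  have := (pvLoop_inv messages).1 []
  simp only [List.nil_append] at this
  exact this.symm
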